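-- pv_equiv track=rewrite | github.com/Rileyd-02/MCUprojection | brands/PinkBra.py | find_best_col
-- ===== SOURCE A (Python) =====
-- def find_best_col(normalized_map, keywords_any=None, keywords_all=None):
--     """
--     Find best original column name from normalized_map whose normalized value contains
--     any of keywords_any or all of keywords_all. Returns original column or None.
--     """
--     # prefer keywords_all match (all present)
--     if keywords_all:
--         for orig, norm in normalized_map.items():
--             if all(k in norm for k in keywords_all):
--                 return orig
--     if keywords_any:
--         for orig, norm in normalized_map.items():
--             for k in keywords_any:
--                 if k in norm:
--                     return orig
--     return None
-- ===== SOURCE B (Python) =====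
-- def find_best_col(normalized_map, keywords_any=None, keywords_all=None):
--     """Single pass: return the first all-match immediately; remember the first
--     any-match as a pending fallback and return it (or None) after the loop."""
--     pending = None
--     for orig, norm in normalized_map.items():
--         if keywords_all and all(k in norm for k in keywords_all):
--             return orig
--         if pending is None and keywords_any and any(k in norm for k in keywords_any):
--             pending = orig
--     return pending
-- ===== Notes on version B (the rewrite author's own statement) =====
-- stated objective: alternative
-- what changed: Replaces A's two sequential scans of the map with one traversal that returns the first all-keywords match immediately and keeps the first any-keyword match as a pending fallback returned after the loop.
import Mathlib
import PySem

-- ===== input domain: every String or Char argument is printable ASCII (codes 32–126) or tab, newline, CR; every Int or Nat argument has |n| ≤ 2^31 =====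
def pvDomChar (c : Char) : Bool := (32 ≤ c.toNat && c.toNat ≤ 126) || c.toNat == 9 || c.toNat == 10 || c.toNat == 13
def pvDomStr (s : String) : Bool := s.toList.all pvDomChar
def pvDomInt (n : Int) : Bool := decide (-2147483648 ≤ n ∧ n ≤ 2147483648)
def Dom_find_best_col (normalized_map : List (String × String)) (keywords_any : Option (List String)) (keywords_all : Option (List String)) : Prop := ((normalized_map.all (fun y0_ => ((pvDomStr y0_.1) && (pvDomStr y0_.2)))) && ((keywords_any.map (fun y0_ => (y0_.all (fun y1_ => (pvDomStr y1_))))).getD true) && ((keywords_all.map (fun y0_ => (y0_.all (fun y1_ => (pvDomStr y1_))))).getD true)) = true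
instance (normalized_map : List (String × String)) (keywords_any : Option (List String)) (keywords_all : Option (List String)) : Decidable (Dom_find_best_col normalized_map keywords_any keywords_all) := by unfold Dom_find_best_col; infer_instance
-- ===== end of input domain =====

-- B replaces A's two sequential scans with one traversal keeping a pending first any-match (alternative decomposition, same cost).


-- ===== PORT A =====
-- first loop of A: return orig on the first row whose norm contains ALL keywords
def pvScanAll : List (String × String) → List String → Option String
  | [], _ => none
  | (orig, norm) :: rest, ks =>
      if ks.all (fun k => PySem.Str.isIn k norm) then some orig else pvScanAll rest ks

-- second loop of A: return orig on the first row whose norm contains ANY keyword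
def pvScanAny : List (String × String) → List String → Option String
  | [], _ => none
  | (orig, norm) :: rest, ks =>
      if ks.any (fun k => PySem.Str.isIn k norm) then some orig else pvScanAny rest ks

def find_best_col (normalized_map : List (String × String)) (keywords_any : Option (List String)) (keywords_all : Option (List String)) : Option String :=
  match (if !(keywords_all.getD []).isEmpty then pvScanAll normalized_map (keywords_all.getD []) else none) with
  | some o => some o
  | none => if !(keywords_any.getD []).isEmpty then pvScanAny normalized_map (keywords_any.getD []) else none

-- ===== PORT B =====
-- single pass: return on an all-match, remember the first any-match in `pending`
def pvScanB : List (String × String) → List String → List String → Option String → Option String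
  | [], _, _, pending => pending
  | (orig, norm) :: rest, kall, kany, pending =>
      if !kall.isEmpty && kall.all (fun k => PySem.Str.isIn k norm) then some orig
      else pvScanB rest kall kany
        (if pending.isNone && (!kany.isEmpty && kany.any (fun k => PySem.Str.isIn k norm)) then some orig else pending)

def find_best_col_alt (normalized_map : List (String × String)) (keywords_any : Option (List String)) (keywords_all : Option (List String)) : Option String :=
  pvScanB normalized_map (keywords_all.getD []) (keywords_any.getD []) none

-- ===== PRECONDITION & SPEC =====
def Spec_find_best_col (normalized_map : List (String × String)) (keywords_any : Option (List String)) (keywords_all : Option (List String)) (out : Option String) : Prop := out = find_best_col_alt normalized_map keywords_any keywords_all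
instance (normalized_map : List (String × String)) (keywords_any : Option (List String)) (keywords_all : Option (List String)) (out : Option String) : Decidable (Spec_find_best_col normalized_map keywords_any keywords_all out) := by unfold Spec_find_best_col; infer_instance

-- ===== CLAIM (what is proved, stated in full; the proofs are below) =====
def Claim_equal_find_best_col : Prop := ∀ (normalized_map : List (String × String)) (keywords_any : Option (List String)) (keywords_all : Option (List String)), Dom_find_best_col normalized_map keywords_any keywords_all → Spec_find_best_col normalized_map keywords_any keywords_all (find_best_col normalized_map keywords_any keywords_all)

-- ===== LEMMAS AND PROOFS =====
-- Invariant of B's single pass: it equals A's all-scan, falling back to `pending`,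
-- falling back to A's any-scan on the same suffix.
theorem pvScanB_eq (m : List (String × String)) (kall kany : List String) (pending : Option String) :
    pvScanB m kall kany pending =
      match (if !kall.isEmpty then pvScanAll m kall else none) with
      | some o => some o
      | none =>
        match pending with
        | some p => some p
        | none => if !kany.isEmpty then pvScanAny m kany else none := by
  induction m generalizing pending with
  | nil => cases pending <;> simp [pvScanB, pvScanAll, pvScanAny]
  | cons hd tl ih =>
    obtain ⟨orig, norm⟩ := hd
    simp only [pvScanB, pvScanAll, pvScanAny]
    rw [ih]
    generalize (kall.all fun k => PySem.Str.isIn k norm) = a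
    generalize (kany.any fun k => PySem.Str.isIn k norm) = b
    cases a <;> cases b <;> cases pending <;>
      by_cases h1 : kall.isEmpty <;> by_cases h3 : kany.isEmpty <;> simp [h1, h3]
-- ===== VERDICT (by name: the statement is the Claim_ definition above) =====
theorem find_best_col_spec : Claim_equal_find_best_col := by
  intro m kany kall _
  unfold Spec_find_best_col find_best_col find_best_col_alt
  rw [pvScanB_eq]
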